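-- pv_equiv track=rewrite | github.com/plurity-ai/plurity-mcp | src/plurity_mcp/config.py | has_scope
-- ===== SOURCE A (Python) =====
-- def has_scope(key_scopes: list[str], required: str) -> bool:
--     """Return True if *key_scopes* grants *required*.
--
--     Supports wildcards:
--       ["*"]          -> full access
--       ["audit:*"]    -> all audit scopes
--       ["audit:read"] -> exact match only
--       ["audit"]      -> exact namespace match (convention: bare name = full access to service)
--     """
--     for scope in key_scopes:
--         if scope == "*":
--             return True
--         if scope.endswith(":*"):
--             ns = scope[:-2]
--             if required == ns or required.startswith(ns + ":"):
--                 return True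
--         if scope == required:
--             return True
--     return False
-- ===== SOURCE B (Python) =====
-- def has_scope(key_scopes: list[str], required: str) -> bool:
--     """Return True if *key_scopes* grants *required* (set-probe formulation).
--
--     Instead of testing each scope against the wildcard rules, derive from
--     *required* the finite list of scope patterns that would grant it, and
--     probe them against a set of the key's scopes.
--     """
--     scopes = set(key_scopes)
--     candidates = ["*", required, required + ":*"]
--     for i, ch in enumerate(required):
--         if ch == ":":
--             candidates.append(required[:i] + ":*")
--     return any(c in scopes for c in candidates)
-- ===== Notes on version B (the rewrite author's own statement) =====
-- stated objective: alternative
-- what changed: Instead of scanning each scope and evaluating wildcard rules on it, B derives from `required` the finite list of granting patterns ('*', required, required+':*', and prefix:* at every colon) and probes them against a set built once from key_scopes.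
import Mathlib
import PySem

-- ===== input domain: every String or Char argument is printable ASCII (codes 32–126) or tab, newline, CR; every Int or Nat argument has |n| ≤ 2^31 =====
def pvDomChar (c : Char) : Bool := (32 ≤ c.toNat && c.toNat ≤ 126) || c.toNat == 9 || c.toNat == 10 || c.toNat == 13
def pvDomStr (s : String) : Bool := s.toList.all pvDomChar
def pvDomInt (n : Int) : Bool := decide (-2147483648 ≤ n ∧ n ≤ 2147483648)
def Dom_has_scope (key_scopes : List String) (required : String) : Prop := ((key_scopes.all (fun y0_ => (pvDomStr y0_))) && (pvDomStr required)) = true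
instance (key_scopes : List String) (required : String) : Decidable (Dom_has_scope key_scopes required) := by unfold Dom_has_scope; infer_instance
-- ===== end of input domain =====

-- B replaces A's per-scope wildcard tests by probing, in a set of the scopes, the
-- finite candidate patterns derived from `required`; proved equal on all inputs.

-- ===== PORT A =====
-- the for-loop with early returns, one string at a time (strings handled as List Char
-- via the exact PySem.Chars primitives)
def pvLoopA : List (List Char) → List Char → Bool
  | [], _ => false
  | scope :: rest, required =>
    if scope = ['*'] then true
    else if PySem.Chars.endswith scope [':', '*'] &&
        (let ns := PySem.List.slice scope none (some (-2));   -- scope[:-2]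
         decide (required = ns) || PySem.Chars.startswith required (ns ++ [':'])) then true
    else if scope = required then true
    else pvLoopA rest required

def has_scope (key_scopes : List String) (required : String) : Bool :=
  pvLoopA (key_scopes.map String.toList) required.toList

-- ===== PORT B =====
-- candidates = ["*", required, required + ":*"] plus required[:i] + ":*" at every colon
-- (required[:i] with i = enumerate index, i ≥ 0, is `take`)
def pvCandidates (required : List Char) : List (List Char) :=
  (PySem.List.enumerate required).foldl
    (fun acc p => if p.2 = ':' then acc ++ [required.take p.1.toNat ++ [':', '*']] else acc)
    [['*'], required, required ++ [':', '*']]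

def has_scope_alt (key_scopes : List String) (required : String) : Bool :=
  let scopes : PySem.Set (List Char) := PySem.Set.ofList (key_scopes.map String.toList)
  (pvCandidates required.toList).any (fun c => PySem.Set.contains scopes c)

-- ===== PRECONDITION & SPEC =====
def Spec_has_scope (key_scopes : List String) (required : String) (out : Bool) : Prop := out = has_scope_alt key_scopes required
instance (key_scopes : List String) (required : String) (out : Bool) : Decidable (Spec_has_scope key_scopes required out) := by unfold Spec_has_scope; infer_instance

-- ===== CLAIM (what is proved, stated in full; the proofs are below) =====
def Claim_equal_has_scope : Prop := ∀ (key_scopes : List String) (required : String), Dom_has_scope key_scopes required → Spec_has_scope key_scopes required (has_scope key_scopes required)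

-- ===== LEMMAS AND PROOFS =====

-- the per-scope test A's loop applies
def pvGrants (required scope : List Char) : Bool :=
  (scope = ['*']) ||
  (PySem.Chars.endswith scope [':', '*'] &&
    (let ns := PySem.List.slice scope none (some (-2));
     decide (required = ns) || PySem.Chars.startswith required (ns ++ [':']))) ||
  (scope = required)

theorem pvLoopA_eq_any (L : List (List Char)) (R : List Char) :
    pvLoopA L R = L.any (pvGrants R) := by
  induction L with
  | nil => rfl
  | cons scope rest ih =>
    simp only [pvLoopA, pvGrants, List.any_cons]
    split_ifs with h1 h2 h3 <;> simp_all

theorem pv_slice_append (t : List Char) :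
    PySem.List.slice (t ++ [':', '*']) none (some (-2)) = t := by
  rw [PySem.List.slice_to_neg_ofNat _ 2 (by omega)]
  simp

theorem pv_foldl_app_map {a b : Type} (f : a → b) (l : List a) (acc : List b) :
    l.foldl (fun acc x => acc ++ [f x]) acc = acc ++ l.map f := by
  induction l generalizing acc with
  | nil => simp
  | cons x xs ih => simp [ih]

theorem pvCandidates_eq (R : List Char) :
    pvCandidates R = [['*'], R, R ++ [':', '*']] ++
      ((PySem.List.enumerate R).filter (fun p => p.2 = ':')).map
        (fun p => R.take p.1.toNat ++ [':', '*']) := by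
  unfold pvCandidates
  rw [PySem.List.foldl_ite_eq_foldl_filter]
  exact pv_foldl_app_map (fun p : Int × Char => R.take p.1.toNat ++ [':', '*']) _ _

theorem pv_mem_candidates (R scope : List Char) :
    scope ∈ pvCandidates R ↔
      scope = ['*'] ∨ scope = R ∨ scope = R ++ [':', '*'] ∨
      ∃ (k : Nat), ∃ (h : k < R.length), R[k] = ':' ∧ scope = R.take k ++ [':', '*'] := by
  rw [pvCandidates_eq]
  simp only [List.mem_append, List.mem_cons, List.not_mem_nil, or_false,
    List.mem_map, List.mem_filter, decide_eq_true_eq]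
  constructor
  · rintro ((h | h | h) | ⟨p, ⟨hp, hc⟩, rfl⟩)
    · exact Or.inl h
    · exact Or.inr (Or.inl h)
    · exact Or.inr (Or.inr (Or.inl h))
    · rw [PySem.List.mem_enumerate_iff] at hp
      obtain ⟨k, hk, rfl⟩ := hp
      exact Or.inr (Or.inr (Or.inr ⟨k, hk, by simpa using hc, by simp⟩))
  · rintro (h | h | h | ⟨k, hk, hc, rfl⟩)
    · exact Or.inl (Or.inl h)
    · exact Or.inl (Or.inr (Or.inl h))
    · exact Or.inl (Or.inr (Or.inr h))
    · refine Or.inr ⟨((k : Int), R[k]), ⟨?_, by simpa using hc⟩, by simp⟩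
      rw [PySem.List.mem_enumerate_iff]
      exact ⟨k, hk, by simp⟩

-- the crux: a scope passes A's test iff it is one of B's candidate patterns
theorem pvGrants_iff_mem (R scope : List Char) :
    pvGrants R scope = true ↔ scope ∈ pvCandidates R := by
  rw [pv_mem_candidates]
  unfold pvGrants
  simp only [Bool.or_eq_true, Bool.and_eq_true, decide_eq_true_eq,
    PySem.Chars.endswith_iff, PySem.Chars.startswith_iff]
  constructor
  · rintro ((hstar | ⟨⟨t, rfl⟩, hin⟩) | hex)
    · exact Or.inl hstar
    · rw [pv_slice_append] at hin
      rcases hin with rfl | ⟨u, rfl⟩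
      · exact Or.inr (Or.inr (Or.inl rfl))
      · refine Or.inr (Or.inr (Or.inr ⟨t.length, by simp, by simp, by simp⟩))
    · exact Or.inr (Or.inl hex)
  · rintro (h | h | h | ⟨k, hk, hc, rfl⟩)
    · exact Or.inl (Or.inl h)
    · exact Or.inr h
    · subst h
      exact Or.inl (Or.inr ⟨⟨R, rfl⟩, by rw [pv_slice_append]; exact Or.inl rfl⟩)
    · refine Or.inl (Or.inr ⟨⟨R.take k, rfl⟩, Or.inr ?_⟩)
      rw [pv_slice_append]
      refine ⟨R.drop (k + 1), ?_⟩
      have : R = R.take k ++ R[k] :: R.drop (k + 1) := by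
        conv_lhs => rw [← List.take_append_drop k R]
        rw [List.drop_eq_getElem_cons hk]
      rw [hc] at this
      simpa using this.symm

theorem has_scope_eq (key_scopes : List String) (required : String) :
    has_scope key_scopes required = has_scope_alt key_scopes required := by
  unfold has_scope has_scope_alt
  rw [pvLoopA_eq_any]
  rw [Bool.eq_iff_iff]
  simp only [List.any_eq_true, PySem.Set.contains_iff, PySem.Set.mem_ofList]
  constructor
  · rintro ⟨s, hs, hg⟩
    exact ⟨s, (pvGrants_iff_mem _ _).mp hg, hs⟩
  · rintro ⟨c, hc, hcs⟩
    exact ⟨c, hcs, (pvGrants_iff_mem _ _).mpr hc⟩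

-- ===== VERDICT (by name: the statement is the Claim_ definition above) =====
theorem has_scope_spec : Claim_equal_has_scope := by
  intro key_scopes required _
  unfold Spec_has_scope
  exact has_scope_eq key_scopes required
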